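-- pv_equiv track=rewrite | github.com/rf-iasys/OEIS | OEIS_A024851_A081714.py | transform_coefficients
-- ===== SOURCE A (Python) =====
-- def transform_coefficients(seq):
--     """
--     Given a sequence seq[0], seq[1], ... returns
--     b_n = coefficient of z^n in seq * (1-z)/(1+z)
--     """
--     n_terms = len(seq)
--     transformed = []
--     for n in range(n_terms):
--         # convolution with 1, -2, 2, -2, ... (from (1-z)/(1+z))
--         val = 0
--         for k in range(n+1):
--             sign = (-1)**k
--             multiplier = 2 if k > 0 else 1
--             val += seq[n - k] * sign * multiplier
--         transformed.append(val)
--     return transformed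
-- ===== SOURCE B (Python) =====
-- def transform_coefficients(seq):
--     """
--     Given a sequence seq[0], seq[1], ... returns
--     b_n = coefficient of z^n in seq * (1-z)/(1+z)
--
--     O(n) via the recurrence b_n = seq[n] - seq[n-1] - b_{n-1}, b_0 = seq[0].
--     """
--     transformed = []
--     prev_b = 0
--     prev_x = 0
--     for x in seq:
--         b = x - prev_x - prev_b
--         transformed.append(b)
--         prev_b = b
--         prev_x = x
--     return transformed
-- ===== Notes on version B (the rewrite author's own statement) =====
-- stated objective: faster
-- what changed: Replaced the quadratic per-index convolution with 1,-2,2,-2,... by a single linear pass using the recurrence b_n = seq[n] - seq[n-1] - b_{n-1}.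
import Mathlib
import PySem

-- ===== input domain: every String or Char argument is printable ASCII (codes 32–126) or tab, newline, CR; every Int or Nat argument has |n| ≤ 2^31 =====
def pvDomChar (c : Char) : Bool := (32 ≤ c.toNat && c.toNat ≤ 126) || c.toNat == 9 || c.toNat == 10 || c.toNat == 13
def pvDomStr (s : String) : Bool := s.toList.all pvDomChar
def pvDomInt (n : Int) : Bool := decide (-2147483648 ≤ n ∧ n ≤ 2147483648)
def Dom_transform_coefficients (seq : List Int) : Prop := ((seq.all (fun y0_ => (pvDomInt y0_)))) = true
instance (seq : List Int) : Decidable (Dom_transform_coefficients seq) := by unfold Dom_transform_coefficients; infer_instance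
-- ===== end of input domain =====

-- B replaces A's quadratic convolution with the linear recurrence b_n = seq[n] - seq[n-1] - b_{n-1} (objective: faster).

-- ===== PORT A =====
-- literal port of A's nested loops; seq[n-k] is always in range here, so pyGetD is exact;
-- (-1)**k has k ≥ 0 in every iteration, so (-1)^k.toNat is exact.
def transform_coefficients (seq : List Int) : List Int :=
  let n_terms : Int := (seq.length : Int)
  (PySem.List.pyRange 0 n_terms 1).foldl
    (fun transformed n =>
      let val : Int := (PySem.List.pyRange 0 (n + 1) 1).foldl
        (fun val k =>
          let sign : Int := (-1 : Int) ^ k.toNat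
          let multiplier : Int := if k > 0 then 2 else 1
          val + PySem.List.pyGetD seq (n - k) 0 * sign * multiplier) 0
      transformed ++ [val]) []

-- ===== PORT B =====
-- one step of B's loop: state = (transformed, prev_b, prev_x)
def pvStepB (st : List Int × Int × Int) (x : Int) : List Int × Int × Int :=
  let b : Int := x - st.2.2 - st.2.1
  (st.1 ++ [b], b, x)

def transform_coefficients_alt (seq : List Int) : List Int :=
  (seq.foldl pvStepB ([], 0, 0)).1

-- ===== PRECONDITION & SPEC =====
def Spec_transform_coefficients (seq : List Int) (out : List Int) : Prop := out = transform_coefficients_alt seq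
instance (seq : List Int) (out : List Int) : Decidable (Spec_transform_coefficients seq out) := by unfold Spec_transform_coefficients; infer_instance

-- ===== CLAIM (what is proved, stated in full; the proofs are below) =====
def Claim_equal_transform_coefficients : Prop := ∀ (seq : List Int), Dom_transform_coefficients seq → Spec_transform_coefficients seq (transform_coefficients seq)

-- ===== LEMMAS AND PROOFS =====

-- the value A's inner loop computes at index n
def pvS (seq : List Int) (n : Nat) : Int :=
  ∑ k ∈ Finset.range (n + 1), seq.getD (n - k) 0 * (-1 : Int) ^ k * (if 0 < k then 2 else 1)

lemma pv_sum_map_range (g : Nat → Int) (m : Nat) :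
    ((List.range m).map g).sum = ∑ k ∈ Finset.range m, g k := by
  induction m with
  | zero => simp
  | succ m ih => rw [List.range_succ, Finset.sum_range_succ]; simp [ih]

lemma pvS_rec (seq : List Int) (n : Nat) :
    pvS seq (n + 1) = seq.getD (n + 1) 0 - seq.getD n 0 - pvS seq n := by
  have key : pvS seq (n + 1) + pvS seq n = seq.getD (n + 1) 0 - seq.getD n 0 := by
    unfold pvS
    rw [Finset.sum_range_succ']
    rw [add_right_comm, ← Finset.sum_add_distrib]
    have h1 : ∀ i ∈ Finset.range (n + 1),
        (seq.getD (n + 1 - (i + 1)) 0 * (-1 : Int) ^ (i + 1) * (if 0 < i + 1 then 2 else 1)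
          + seq.getD (n - i) 0 * (-1 : Int) ^ i * (if 0 < i then 2 else 1))
        = (if i = 0 then -(seq.getD n 0) else 0) := by
      intro i _
      have hidx : n + 1 - (i + 1) = n - i := by omega
      rw [hidx]
      cases i with
      | zero => norm_num; ring
      | succ j => simp only [pow_succ]; norm_num
    rw [Finset.sum_congr rfl h1, Finset.sum_ite_eq' (Finset.range (n + 1)) 0]
    simp only [Finset.mem_range, Nat.succ_pos, if_pos, pow_zero, lt_irrefl,
      if_false, mul_one, Nat.sub_zero]
    ring_nf
  linarith

-- agreement of pvS on a prefix: pvS only reads indices ≤ n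
lemma pvS_append (ys : List Int) (x : Int) (n : Nat) (hn : n < ys.length) :
    pvS (ys ++ [x]) n = pvS ys n := by
  unfold pvS
  refine Finset.sum_congr rfl (fun k _ => ?_)
  rw [List.getD_append]
  omega

lemma pv_getD_append (ys : List Int) (x : Int) (n : Nat) (hn : n < ys.length) :
    (ys ++ [x]).getD n 0 = ys.getD n 0 := by
  rw [List.getD_append]; omega

lemma pv_getD_concat_length (ys : List Int) (x : Int) :
    (ys ++ [x]).getD ys.length 0 = x := by
  simp [List.getD_eq_getElem?_getD]

-- B's loop invariant
lemma pvB_state (seq : List Int) :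
    seq.foldl pvStepB ([], 0, 0)
      = ((List.range seq.length).map (pvS seq), pvS seq (seq.length - 1), seq.getD (seq.length - 1) 0) := by
  induction seq using List.reverseRecOn with
  | nil => simp [pvS]
  | append_singleton ys x ih =>
    rw [List.foldl_append, ih]
    have hb : x - ys.getD (ys.length - 1) 0 - pvS ys (ys.length - 1) = pvS (ys ++ [x]) ys.length := by
      cases ys with
      | nil => simp [pvS]
      | cons a t =>
        have hlt : (a :: t).length - 1 < (a :: t).length := by simp
        have hlen : (a :: t).length = ((a :: t).length - 1) + 1 := by simp
        rw [hlen, pvS_rec, ← hlen, pv_getD_concat_length,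
          pv_getD_append _ _ _ hlt, pvS_append _ _ _ hlt]
    have hmap : (List.range (ys ++ [x]).length).map (pvS (ys ++ [x]))
        = (List.range ys.length).map (pvS ys) ++ [pvS (ys ++ [x]) ys.length] := by
      rw [List.length_append, List.length_singleton, List.range_succ, List.map_append,
        List.map_singleton]
      congr 1
      exact List.map_congr_left (fun n hn => pvS_append ys x n (List.mem_range.mp hn))
    show ((List.range ys.length).map (pvS ys)
            ++ [x - ys.getD (ys.length - 1) 0 - pvS ys (ys.length - 1)],
          x - ys.getD (ys.length - 1) 0 - pvS ys (ys.length - 1), x) = _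
    rw [hb, hmap]
    refine congrArg₂ Prod.mk rfl (congrArg₂ Prod.mk ?_ ?_)
    · rw [List.length_append, List.length_singleton, Nat.add_sub_cancel]
    · rw [List.length_append, List.length_singleton, Nat.add_sub_cancel, pv_getD_concat_length]

lemma pv_inner_eq_pvS (seq : List Int) (n : Nat) :
    (PySem.List.pyRange 0 ((n : Int) + 1) 1).foldl
      (fun val k =>
        val + PySem.List.pyGetD seq (n - k) 0 * ((-1 : Int) ^ k.toNat) * (if k > 0 then 2 else 1)) 0
    = pvS seq n := by
  have hcast : ((n : Int) + 1) = ((n + 1 : Nat) : Int) := by push_cast; ring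
  rw [hcast, PySem.List.pyRange_zero_nat, List.foldl_map, PySem.List.foldl_add, zero_add,
    pv_sum_map_range]
  unfold pvS
  refine Finset.sum_congr rfl (fun k hk => ?_)
  have hk' : k ≤ n := by
    have := Finset.mem_range.mp hk; omega
  have hidx : (n : Int) - (k : Int) = ((n - k : Nat) : Int) := by omega
  rw [hidx, PySem.List.pyGetD_natCast, Int.toNat_natCast]
  congr 1
  simp

lemma pvA_eq_map (seq : List Int) :
    transform_coefficients seq = (List.range seq.length).map (pvS seq) := by
  show (PySem.List.pyRange 0 ((seq.length : Nat) : Int) 1).foldl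
      (fun transformed n =>
        transformed ++ [(PySem.List.pyRange 0 (n + 1) 1).foldl
          (fun val k =>
            val + PySem.List.pyGetD seq (n - k) 0 * ((-1 : Int) ^ k.toNat) *
              (if k > 0 then 2 else 1)) 0]) [] = _
  rw [PySem.List.pyRange_zero_nat, PySem.List.foldl_append_singleton_eq_map, List.nil_append,
    List.map_map]
  refine List.map_congr_left (fun n _ => ?_)
  exact pv_inner_eq_pvS seq n

-- ===== VERDICT (by name: the statement is the Claim_ definition above) =====
theorem transform_coefficients_spec : Claim_equal_transform_coefficients := by
  intro seq _
  unfold Spec_transform_coefficients transform_coefficients_alt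
  rw [pvB_state, pvA_eq_map]
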